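-- pv_equiv track=rewrite | github.com/kunalchand/daily-leetcode-practice | rishabh/90. Subsets II.py | subsetsWithDup2
-- ===== SOURCE A (Python) =====
-- from typing import List
--
-- def subsetsWithDup2(nums: List[int]) -> List[List[int]]:
--     res, seen = [], set()
--
--     def backtrack(start, curr_path):
--         if start > len(nums):
--             return
--
--         # add every unique node into the res
--         if tuple(curr_path) not in seen:
--             seen.add(tuple(curr_path))
--             res.append(curr_path.copy())
--             # return
--
--         for idx in range(start, len(nums)):
--             curr_path.append(nums[idx])
--             backtrack(idx + 1, curr_path)
--             curr_path.pop()
--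
--     nums.sort()
--     backtrack(0, [])
--     return res
-- ===== SOURCE B (Python) =====
-- from typing import List
--
-- def subsetsWithDup2(nums: List[int]) -> List[List[int]]:
--     # Iterative DFS with an explicit stack over sorted input, skipping duplicate
--     # siblings: each distinct subset is produced exactly once, no seen-set and no
--     # recursion.  (Sorts nums in place, like A.)
--     nums.sort()
--     n = len(nums)
--     res = []
--     stack = [(0, [])]
--     while stack:
--         start, path = stack.pop()
--         res.append(path)
--         # push children in reverse index order so the leftmost child is on top
--         for idx in range(n - 1, start - 1, -1):
--             if idx > start and nums[idx] == nums[idx - 1]: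
--                 continue
--             stack.append((idx + 1, path + [nums[idx]]))
--     return res
-- ===== Notes on version B (the rewrite author's own statement) =====
-- stated objective: faster
-- what changed: A recursively enumerates all 2^n index subsets and filters duplicates through a seen-set of tuples; B is an iterative explicit-stack DFS over the sorted input that skips a sibling equal to its predecessor, so every distinct subset is produced exactly once with no recursion and no seen-set.
import Mathlib
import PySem

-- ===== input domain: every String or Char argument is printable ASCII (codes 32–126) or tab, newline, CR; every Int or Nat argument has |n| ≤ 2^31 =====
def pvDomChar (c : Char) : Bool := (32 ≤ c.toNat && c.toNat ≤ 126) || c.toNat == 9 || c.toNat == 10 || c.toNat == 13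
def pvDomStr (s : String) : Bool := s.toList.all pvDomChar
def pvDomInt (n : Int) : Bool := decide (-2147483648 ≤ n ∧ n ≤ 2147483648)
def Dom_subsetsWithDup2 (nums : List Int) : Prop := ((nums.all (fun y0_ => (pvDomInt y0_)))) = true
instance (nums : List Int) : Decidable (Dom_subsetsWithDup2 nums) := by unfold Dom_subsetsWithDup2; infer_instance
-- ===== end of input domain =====

-- B replaces A's recursive enumerate-all-paths-with-a-seen-set by an iterative
-- explicit-stack DFS over the sorted input that skips duplicate siblings
-- (objective: faster; A also sorts nums in place — B performs the same mutation;
-- the equivalence proved here is about the return value).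

-- ===== PORT A =====
-- A's backtrack(start, curr_path) is ported over the remaining suffix l = nums[start:]
-- (the loop 'for idx in range(start, len(nums))' walks that suffix; nums[idx] is its head);
-- fuel bounds the recursion depth (A's 'if start > len(nums): return' guard: with fuel
-- len(nums)+1 at the top call, fuel never reaches 0, exactly as that guard never fires).
-- State = (res, seen); the emit step is A's 'if tuple(curr_path) not in seen' block.
def pvLoopA (rec : List Int → List Int → List (List Int) × PySem.Set (List Int) → List (List Int) × PySem.Set (List Int)) :
    List Int → List Int → List (List Int) × PySem.Set (List Int) → List (List Int) × PySem.Set (List Int)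
  | [], _, st => st
  | x :: t, path, st => pvLoopA rec t path (rec t (path ++ [x]) st)

def pvBtA : Nat → List Int → List Int → List (List Int) × PySem.Set (List Int) → List (List Int) × PySem.Set (List Int)
  | 0, _, _, st => st
  | f + 1, l, path, st =>
    pvLoopA (pvBtA f) l path
      (if PySem.Set.contains st.2 path then st else (st.1 ++ [path], PySem.Set.add st.2 path))

def subsetsWithDup2 (nums : List Int) : List (List Int) :=
  (pvBtA ((PySem.List.sorted nums (fun x => x)).length + 1) (PySem.List.sorted nums (fun x => x))
    [] ([], PySem.Set.empty)).1

-- ===== PORT B =====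
-- Source B's 'for idx in range(n-1, start-1, -1): … stack.append(...)' pushes the children
-- of a node in reverse index order onto an end-of-list stack, so 'stack.pop()' yields
-- them left to right; the port models the stack with its TOP AT THE HEAD, so that loop
-- becomes: build the children in forward index order (pvChildren, where prev = nums[idx-1]
-- when idx > start carries the 'if idx > start and nums[idx] == nums[idx-1]: continue'
-- test) and prepend them.  Nodes are (remaining suffix nums[start:], path).  The fuel
-- 2^len bounds the number of 'while stack' iterations (totality guard only).
def pvChildren : Option Int → List Int → List Int → List (List Int × List Int)
  | _, [], _ => []
  | prev, x :: t, path =>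
    if prev = some x then pvChildren (some x) t path
    else (t, path ++ [x]) :: pvChildren (some x) t path

def pvRun : Nat → List (List Int × List Int) → List (List Int) → List (List Int)
  | 0, _, res => res
  | _ + 1, [], res => res
  | f + 1, (l, path) :: rest, res =>
    pvRun f (pvChildren none l path ++ rest) (res ++ [path])

def subsetsWithDup2_alt (nums : List Int) : List (List Int) :=
  pvRun (2 ^ (PySem.List.sorted nums (fun x => x)).length)
    [(PySem.List.sorted nums (fun x => x), [])] []

-- ===== PRECONDITION & SPEC =====
def Spec_subsetsWithDup2 (nums : List Int) (out : List (List Int)) : Prop := out = subsetsWithDup2_alt nums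
instance (nums : List Int) (out : List (List Int)) : Decidable (Spec_subsetsWithDup2 nums out) := by unfold Spec_subsetsWithDup2; infer_instance

-- ===== CLAIM (what is proved, stated in full; the proofs are below) =====
def Claim_equal_subsetsWithDup2 : Prop := ∀ (nums : List Int), Dom_subsetsWithDup2 nums → Spec_subsetsWithDup2 nums (subsetsWithDup2 nums)

-- ===== LEMMAS AND PROOFS =====

-- Canonical emitter: the list of subsets a sorted duplicate-skipping DFS emits, as a
-- plain structural recursion; both ports are proved equal to it.
def pvC : Option Int → List Int → List Int → List (List Int)
  | _, [], _ => []
  | prev, x :: t, path =>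
    if prev = some x then pvC (some x) t path
    else ((path ++ [x]) :: pvC none t (path ++ [x])) ++ pvC (some x) t path
termination_by _ l _ => l.length

def pvEmit (l path : List Int) : List (List Int) := path :: pvC none l path

-- Proof-side recursive form of B's traversal (used as a bridge between A and pvEmit).
def pvLoopB (rec : List Int → List Int → List (List Int) → List (List Int)) :
    Option Int → List Int → List Int → List (List Int) → List (List Int)
  | _, [], _, res => res
  | prev, x :: t, path, res =>
    if prev = some x then pvLoopB rec (some x) t path res
    else pvLoopB rec (some x) t path (rec t (path ++ [x]) res)

def pvBtB : Nat → List Int → List Int → List (List Int) → List (List Int)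
  | 0, _, _, res => res
  | f + 1, l, path, res => pvLoopB (pvBtB f) none l path (res ++ [path])

lemma pv_contains_iff (s : List (List Int)) (x : List Int) :
    PySem.Set.contains s x = true ↔ x ∈ s := by
  simp [PySem.Set.contains]

lemma pv_add_not_mem (s : List (List Int)) (x : List Int) (h : x ∉ s) :
    PySem.Set.add s x = s ++ [x] := by
  simp [PySem.Set.add, PySem.Set.contains, h]

-- A's subtree is a no-op when every subset it would emit is already in seen.
lemma pv_skip (f : Nat) :
    (∀ (l path res : _), (∀ σ : List Int, σ.Sublist l → path ++ σ ∈ res) →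
        pvBtA f l path (res, res) = (res, res))
    ∧ (∀ (l path res : _), (∀ σ : List Int, σ.Sublist l → σ ≠ [] → path ++ σ ∈ res) →
        pvLoopA (pvBtA f) l path (res, res) = (res, res)) := by
  induction f with
  | zero =>
    constructor
    · intro l path res _h; simp [pvBtA]
    · intro l
      induction l with
      | nil => intro path res _h; simp [pvLoopA]
      | cons x t ihl =>
        intro path res _h
        simp only [pvLoopA, pvBtA]
        exact ihl path res (fun σ hσ hne => _h σ (hσ.cons x) hne)
  | succ f ih =>
    have hbt : ∀ (l path res : _), (∀ σ : List Int, σ.Sublist l → path ++ σ ∈ res) →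
        pvBtA (f + 1) l path (res, res) = (res, res) := by
      intro l path res h
      have hp : path ∈ res := by simpa using h [] (List.nil_sublist l)
      simp only [pvBtA]
      rw [if_pos ((pv_contains_iff res path).mpr hp)]
      exact ih.2 l path res (fun σ hσ _ => h σ hσ)
    refine ⟨hbt, ?_⟩
    intro l
    induction l with
    | nil => intro path res _h; simp [pvLoopA]
    | cons x t ihl =>
      intro path res h
      simp only [pvLoopA]
      rw [hbt t (path ++ [x]) res (by
        intro σ hσ
        rw [List.append_assoc, List.singleton_append]
        exact h (x :: σ) (hσ.cons₂ x) (by simp))]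
      exact ihl path res (fun σ hσ hne => h σ (hσ.cons x) hne)

-- pvBtB only ever appends to res.
lemma pv_appB (f : Nat) :
    (∀ (l path res : _), pvBtB f l path res = res ++ pvBtB f l path [])
    ∧ (∀ (prev : Option Int) (l path res : _),
        pvLoopB (pvBtB f) prev l path res = res ++ pvLoopB (pvBtB f) prev l path []) := by
  induction f with
  | zero =>
    constructor
    · intro l path res; simp [pvBtB]
    · intro prev l
      induction l generalizing prev with
      | nil => intro path res; simp [pvLoopB]
      | cons x t ihl =>
        intro path res
        simp only [pvLoopB, pvBtB]
        by_cases hx : prev = some x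
        · rw [if_pos hx, if_pos hx]; exact ihl (some x) path res
        · rw [if_neg hx, if_neg hx]; exact ihl (some x) path res
  | succ f ih =>
    have hbt : ∀ (l path res : _), pvBtB (f + 1) l path res = res ++ pvBtB (f + 1) l path [] := by
      intro l path res
      simp only [pvBtB]
      rw [ih.2 none l path (res ++ [path]), ih.2 none l path ([] ++ [path])]
      simp
    refine ⟨hbt, ?_⟩
    intro prev l
    induction l generalizing prev with
    | nil => intro path res; simp [pvLoopB]
    | cons x t ihl =>
      intro path res
      simp only [pvLoopB]
      by_cases hx : prev = some x
      · rw [if_pos hx, if_pos hx]; exact ihl (some x) path res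
      · rw [if_neg hx, if_neg hx]
        rw [hbt t (path ++ [x]) res, ihl (some x) path (res ++ pvBtB (f+1) t (path ++ [x]) []),
            ihl (some x) path (pvBtB (f+1) t (path ++ [x]) [])]
        simp

-- Main invariant: on sorted input, A's dedup traversal and the duplicate-sibling-skipping
-- traversal emit the same list, which contains path ++ σ for exactly the sublists σ of l.
lemma pv_main (f : Nat) :
    (∀ l : List Int, List.Pairwise (· ≤ ·) l → ∀ path res, l.length < f →
      (∀ σ : List Int, σ.Sublist l → path ++ σ ∉ res) →
      pvBtA f l path (res, res) = (res ++ pvBtB f l path [], res ++ pvBtB f l path [])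
      ∧ (∀ y ∈ pvBtB f l path [], ∃ σ, σ.Sublist l ∧ y = path ++ σ)
      ∧ (∀ σ : List Int, σ.Sublist l → path ++ σ ∈ pvBtB f l path []))
    ∧ (∀ l : List Int, List.Pairwise (· ≤ ·) l → ∀ (prev : Option Int) (path res : _), l.length ≤ f →
      (∀ p, prev = some p → ∀ x ∈ l, p ≤ x) →
      (∀ p, prev = some p → ∀ σ : List Int, σ.Sublist l → path ++ p :: σ ∈ res) →
      (∀ σ : List Int, σ.Sublist l → σ ≠ [] → (∀ p, prev = some p → σ.head? ≠ some p) →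
        path ++ σ ∉ res) →
      pvLoopA (pvBtA f) l path (res, res)
        = (res ++ pvLoopB (pvBtB f) prev l path [], res ++ pvLoopB (pvBtB f) prev l path [])
      ∧ (∀ y ∈ pvLoopB (pvBtB f) prev l path [], ∃ σ, σ.Sublist l ∧ σ ≠ [] ∧ y = path ++ σ)
      ∧ (∀ σ : List Int, σ.Sublist l → σ ≠ [] → path ++ σ ∈ res ++ pvLoopB (pvBtB f) prev l path [])) := by
  induction f with
  | zero =>
    constructor
    · intro l _ path res hlen _; exact absurd hlen (Nat.not_lt_zero _)
    · intro l _ prev path res hlen _ _ _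
      have hl : l = [] := List.length_eq_zero_iff.mp (Nat.le_zero.mp hlen)
      subst hl
      refine ⟨by simp [pvLoopA, pvLoopB], by simp [pvLoopB], ?_⟩
      intro σ hσ hne
      exact absurd (List.sublist_nil.mp hσ) hne
  | succ f ih =>
    have htree : ∀ l : List Int, List.Pairwise (· ≤ ·) l → ∀ path res, l.length < f + 1 →
        (∀ σ : List Int, σ.Sublist l → path ++ σ ∉ res) →
        pvBtA (f+1) l path (res, res) = (res ++ pvBtB (f+1) l path [], res ++ pvBtB (f+1) l path [])
        ∧ (∀ y ∈ pvBtB (f+1) l path [], ∃ σ, σ.Sublist l ∧ y = path ++ σ)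
        ∧ (∀ σ : List Int, σ.Sublist l → path ++ σ ∈ pvBtB (f+1) l path []) := by
      intro l hs path res hlen hfresh
      have hp : path ∉ res := by simpa using hfresh [] (List.nil_sublist l)
      have hB : pvBtB (f+1) l path [] = [path] ++ pvLoopB (pvBtB f) none l path [] := by
        simp only [pvBtB]
        rw [(pv_appB f).2 none l path ([] ++ [path])]
        simp
      obtain ⟨h1, h2, h3⟩ := ih.2 l hs none path (res ++ [path]) (Nat.lt_succ_iff.mp hlen)
        (by intro p hp'; cases hp')
        (by intro p hp'; cases hp')
        (by
          intro σ hσ hne _ hmem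
          rcases List.mem_append.mp hmem with h | h
          · exact hfresh σ hσ h
          · have hps : path ++ σ = path := by simpa using h
            have hl0 : σ.length = 0 := by
              have h' := congrArg List.length hps; simpa using h'
            exact hne (List.length_eq_zero_iff.mp hl0))
      constructor
      · simp only [pvBtA]
        rw [if_neg (by
          intro hc
          exact hp ((pv_contains_iff res path).mp (by simpa using hc)))]
        rw [pv_add_not_mem res path hp]
        rw [hB]
        rw [h1]
        simp
      constructor
      · intro y hy
        rw [hB] at hy
        rcases List.mem_append.mp hy with h | h
        · refine ⟨[], List.nil_sublist l, ?_⟩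
          simp at h; simp [h]
        · obtain ⟨σ, hσ, _, hyeq⟩ := h2 y h
          exact ⟨σ, hσ, hyeq⟩
      · intro σ hσ
        rw [hB]
        by_cases hne : σ = []
        · subst hne; simp
        · have := h3 σ hσ hne
          rcases List.mem_append.mp this with h | h
          · rcases List.mem_append.mp h with h' | h'
            · exact absurd h' (hfresh σ hσ)
            · have hpe : path ++ σ = path := by simpa using h'
              have hl0 : σ.length = 0 := by
                have h'' := congrArg List.length hpe; simpa using h''
              exact absurd (List.length_eq_zero_iff.mp hl0) hne
          · exact List.mem_append_right _ h
    refine ⟨htree, ?_⟩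
    intro l
    induction l with
    | nil =>
      intro _ prev path res _ _ _ _
      refine ⟨by simp [pvLoopA, pvLoopB], by simp [pvLoopB], ?_⟩
      intro σ hσ hne
      exact absurd (List.sublist_nil.mp hσ) hne
    | cons x t ihl =>
      intro hs prev path res hlen hord hin hfresh
      have hs' : List.Pairwise (· ≤ ·) t := (List.pairwise_cons.mp hs).2
      have hxle : ∀ y ∈ t, x ≤ y := (List.pairwise_cons.mp hs).1
      have hlen' : t.length ≤ f + 1 := Nat.le_of_succ_le hlen
      have hlent : t.length < f + 1 := hlen
      by_cases hx : prev = some x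
      · -- duplicate sibling: A's whole subtree is already in seen, B skips it
        have hskip : pvBtA (f+1) t (path ++ [x]) (res, res) = (res, res) := by
          apply (pv_skip (f+1)).1
          intro σ hσ
          rw [List.append_assoc, List.singleton_append]
          exact hin x hx σ (hσ.cons x)
        obtain ⟨h1, h2, h3⟩ := ihl hs' (some x) path res hlen'
          (by intro p hp; injection hp with hp; subst hp; exact hxle)
          (by
            intro p hp σ hσ
            injection hp with hp; subst hp
            exact hin x hx σ (hσ.cons x))
          (by
            intro σ hσ hne hhd
            exact hfresh σ (hσ.cons x) hne (by
              intro p hp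
              rw [hx] at hp
              injection hp with hp; subst hp
              exact hhd x rfl))
        have hBskip : pvLoopB (pvBtB (f+1)) prev (x :: t) path [] = pvLoopB (pvBtB (f+1)) (some x) t path [] := by
          simp only [pvLoopB]
          rw [if_pos hx]
        refine ⟨?_, ?_, ?_⟩
        · simp only [pvLoopA]
          rw [hskip, hBskip]
          exact h1
        · intro y hy
          rw [hBskip] at hy
          obtain ⟨σ, hσ, hne, hyeq⟩ := h2 y hy
          exact ⟨σ, hσ.cons x, hne, hyeq⟩
        · intro σ hσ hne
          rw [hBskip]
          rcases List.sublist_cons_iff.mp hσ with h | ⟨r, hr, hrt⟩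
          · exact h3 σ h hne
          · subst hr
            refine List.mem_append_left _ ?_
            rw [← List.singleton_append, ← List.append_assoc]
            have := hin x hx r (hrt.cons x)
            rwa [← List.singleton_append, ← List.append_assoc] at this
      · -- fresh sibling: A's subtree emits exactly B's subtree
        have hfr : ∀ σ : List Int, σ.Sublist t → (path ++ [x]) ++ σ ∉ res := by
          intro σ hσ
          rw [List.append_assoc, List.singleton_append]
          apply hfresh (x :: σ) (hσ.cons₂ x) (by simp)
          intro p hp
          simp only [List.head?_cons]
          intro hcontra
          injection hcontra with hcontra
          subst hcontra
          exact hx hp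
        obtain ⟨e1, e2, e3⟩ := htree t hs' (path ++ [x]) res hlent hfr
        set S := pvBtB (f+1) t (path ++ [x]) [] with hSdef
        have hin' : ∀ σ : List Int, σ.Sublist t → path ++ x :: σ ∈ res ++ S := by
          intro σ hσ
          refine List.mem_append_right _ ?_
          have := e3 σ hσ
          rwa [List.append_assoc, List.singleton_append] at this
        have hfresh' : ∀ σ : List Int, σ.Sublist t → σ ≠ [] →
            (∀ p, (some x : Option Int) = some p → σ.head? ≠ some p) → path ++ σ ∉ res ++ S := by
          intro σ hσ hne hhd hmem
          rcases List.mem_append.mp hmem with h | h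
          · refine hfresh σ (hσ.cons x) hne ?_ h
            intro p hp
            obtain ⟨a, σ', rfl⟩ := List.exists_cons_of_ne_nil hne
            have hpx : p ≤ x := hord p hp x List.mem_cons_self
            have hxa : x ≤ a := hxle a (hσ.subset List.mem_cons_self)
            have hpnex : p ≠ x := fun he => hx (he ▸ hp)
            simp only [List.head?_cons, Ne, Option.some.injEq]
            intro hc
            exact absurd hc (by omega)
          · obtain ⟨σ', hσ', hyeq⟩ := e2 _ h
            rw [List.append_assoc, List.singleton_append] at hyeq
            have hσeq : σ = x :: σ' := List.append_cancel_left hyeq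
            cases σ with
            | nil => exact hne rfl
            | cons a σ'' =>
              injection hσeq with h1' h2'
              subst h1'
              exact hhd a rfl (by simp)
        obtain ⟨h1, h2, h3⟩ := ihl hs' (some x) path (res ++ S) hlen'
          (by intro p hp; injection hp with hp; subst hp; exact hxle)
          (by
            intro p hp σ hσ
            injection hp with hp; subst hp
            exact hin' σ hσ)
          hfresh'
        have hBstep : pvLoopB (pvBtB (f+1)) prev (x :: t) path []
            = S ++ pvLoopB (pvBtB (f+1)) (some x) t path [] := by
          simp only [pvLoopB]
          rw [if_neg hx]
          rw [(pv_appB (f+1)).2 (some x) t path S]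
        refine ⟨?_, ?_, ?_⟩
        · simp only [pvLoopA]
          rw [e1, h1, hBstep]
          simp
        · intro y hy
          rw [hBstep] at hy
          rcases List.mem_append.mp hy with h | h
          · obtain ⟨σ, hσ, hyeq⟩ := e2 y h
            rw [List.append_assoc, List.singleton_append] at hyeq
            exact ⟨x :: σ, hσ.cons₂ x, by simp, hyeq⟩
          · obtain ⟨σ, hσ, hne, hyeq⟩ := h2 y h
            exact ⟨σ, hσ.cons x, hne, hyeq⟩
        · intro σ hσ hne
          rw [hBstep]
          rcases List.sublist_cons_iff.mp hσ with h | ⟨r, hr, hrt⟩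
          · have := h3 σ h hne
            rcases List.mem_append.mp this with h' | h'
            · rcases List.mem_append.mp h' with h'' | h''
              · exact List.mem_append_left _ h''
              · exact List.mem_append_right _ (List.mem_append_left _ h'')
            · exact List.mem_append_right _ (List.mem_append_right _ h')
          · subst hr
            refine List.mem_append_right _ (List.mem_append_left _ ?_)
            have := e3 r hrt
            rwa [List.append_assoc, List.singleton_append] at this

-- pvBtB with sufficient fuel computes pvEmit (and its loop computes pvC).
lemma pv_btB_emit (f : Nat) :
    (∀ (l path res : _), l.length < f → pvBtB f l path res = res ++ pvEmit l path)
    ∧ (∀ (prev : Option Int) (l path res : _), l.length ≤ f →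
        pvLoopB (pvBtB f) prev l path res = res ++ pvC prev l path) := by
  induction f with
  | zero =>
    constructor
    · intro l path res h; exact absurd h (Nat.not_lt_zero _)
    · intro prev l path res h
      have hl : l = [] := List.length_eq_zero_iff.mp (Nat.le_zero.mp h)
      subst hl; simp [pvLoopB, pvC]
  | succ f ih =>
    have hbt : ∀ (l path res : _), l.length < f + 1 → pvBtB (f+1) l path res = res ++ pvEmit l path := by
      intro l path res h
      simp only [pvBtB]
      rw [ih.2 none l path (res ++ [path]) (Nat.lt_succ_iff.mp h)]
      simp [pvEmit]
    refine ⟨hbt, ?_⟩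
    intro prev l
    induction l generalizing prev with
    | nil => intro path res _; simp [pvLoopB, pvC]
    | cons x t ihl =>
      intro path res h
      simp only [pvLoopB, pvC]
      by_cases hx : prev = some x
      · rw [if_pos hx, if_pos hx]
        exact ihl (some x) path res (Nat.le_of_succ_le h)
      · rw [if_neg hx, if_neg hx]
        rw [hbt t (path ++ [x]) res h]
        rw [ihl (some x) path (res ++ pvEmit t (path ++ [x])) (Nat.le_of_succ_le h)]
        simp [pvEmit]

-- pvC is the concatenation of the subtrees of the children list.
lemma pv_children_emit : ∀ (l : List Int) (prev : Option Int) (path : List Int),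
    pvC prev l path = ((pvChildren prev l path).map (fun e => pvEmit e.1 e.2)).flatten := by
  intro l
  induction l with
  | nil => intro prev path; simp [pvC, pvChildren]
  | cons x t ihl =>
    intro prev path
    simp only [pvC, pvChildren]
    by_cases hx : prev = some x
    · rw [if_pos hx, if_pos hx]; exact ihl (some x) path
    · rw [if_neg hx, if_neg hx]
      simp only [List.map_cons, List.flatten_cons]
      rw [ihl (some x) path]
      simp [pvEmit]

-- Fuel accounting: the stack measure bounds the number of while-iterations.
def pvStackMeasure (stack : List (List Int × List Int)) : Nat :=
  (stack.map (fun e => 2 ^ e.1.length)).sum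

lemma pv_children_measure : ∀ (l : List Int) (prev : Option Int) (path : List Int),
    pvStackMeasure (pvChildren prev l path) ≤ 2 ^ l.length - 1 := by
  intro l
  induction l with
  | nil => intro prev path; simp [pvChildren, pvStackMeasure]
  | cons x t ihl =>
    intro prev path
    have hpos : 1 ≤ 2 ^ t.length := Nat.one_le_two_pow
    simp only [pvChildren]
    by_cases hx : prev = some x
    · rw [if_pos hx]
      calc pvStackMeasure (pvChildren (some x) t path) ≤ 2 ^ t.length - 1 := ihl (some x) path
        _ ≤ 2 ^ (x :: t).length - 1 := by
            simp only [List.length_cons, pow_succ]; omega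
    · rw [if_neg hx]
      have h2 := ihl (some x) path
      simp only [pvStackMeasure, List.map_cons, List.sum_cons, List.length_cons, pow_succ]
      simp only [pvStackMeasure] at h2
      omega

-- The stack machine emits the concatenation of the subtrees on the stack.
lemma pv_run_emit : ∀ (fuel : Nat) (stack : List (List Int × List Int)) (res : List (List Int)),
    pvStackMeasure stack ≤ fuel →
    pvRun fuel stack res = res ++ (stack.map (fun e => pvEmit e.1 e.2)).flatten := by
  intro fuel
  induction fuel with
  | zero =>
    intro stack res h
    cases stack with
    | nil => simp [pvRun]
    | cons e rest =>
      exfalso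
      have : 1 ≤ 2 ^ e.1.length := Nat.one_le_two_pow
      simp only [pvStackMeasure, List.map_cons, List.sum_cons, Nat.le_zero] at h
      omega
  | succ fuel ih =>
    intro stack res h
    cases stack with
    | nil => simp [pvRun]
    | cons e rest =>
      obtain ⟨l, path⟩ := e
      simp only [pvRun]
      have hpos : 1 ≤ 2 ^ l.length := Nat.one_le_two_pow
      have hch := pv_children_measure l none path
      have hm : pvStackMeasure (pvChildren none l path ++ rest) ≤ fuel := by
        simp only [pvStackMeasure, List.map_append, List.sum_append] at *
        simp only [List.map_cons, List.sum_cons] at h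
        omega
      rw [ih (pvChildren none l path ++ rest) (res ++ [path]) hm]
      simp only [List.map_append, List.flatten_append, List.map_cons, List.flatten_cons]
      rw [← pv_children_emit l none path]
      simp [pvEmit]

-- ===== VERDICT (by name: the statement is the Claim_ definition above) =====
theorem subsetsWithDup2_spec : Claim_equal_subsetsWithDup2 := by
  intro nums _
  unfold Spec_subsetsWithDup2 subsetsWithDup2 subsetsWithDup2_alt
  have hsorted : List.Pairwise (· ≤ ·) (PySem.List.sorted nums (fun x => x)) := by
    simpa using PySem.List.sorted_pairwise nums (fun x => x)
  obtain ⟨h1, -, -⟩ := (pv_main ((PySem.List.sorted nums (fun x => x)).length + 1)).1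
    (PySem.List.sorted nums (fun x => x)) hsorted [] [] (Nat.lt_succ_self _)
    (by intro σ _ h; simp at h)
  rw [show (PySem.Set.empty : PySem.Set (List Int)) = ([] : List (List Int)) from rfl, h1]
  rw [(pv_btB_emit ((PySem.List.sorted nums (fun x => x)).length + 1)).1 _ [] []
    (Nat.lt_succ_self _)]
  rw [pv_run_emit _ _ _ (by simp [pvStackMeasure])]
  simp
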